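-- pv_equiv track=rewrite | github.com/djb-ldp/determiner_noun_productivity_onset | extract_determiner_noun_phrases.py | prod_det_nps
-- ===== SOURCE A (Python) =====
-- def prod_det_nps(det_df_all_nouns_li):
--
--     nps_set_di = {}
--     for x in set(det_df_all_nouns_li):
--         if x.split()[1] not in nps_set_di.keys():
--             nps_set_di[x.split()[1]] = {'dets_li': []}
--
--             nps_set_di[x.split()[1]]['dets_li'].append(x.split()[0])
--
--         else:
--
--             nps_set_di[x.split()[1]]['dets_li'].append(x.split()[0])
--
--     prod_nouns = [k for k, v in nps_set_di.items() if len(nps_set_di[k]['dets_li']) >=2]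
--
--     if len(prod_nouns) >= 1:
--
--
--
--         return {'productive_bool': 1, 'num_productive_nouns': len(prod_nouns)}
--
--     else:
--         return {'productive_bool': 0, 'num_productive_nouns': len(prod_nouns)}
-- ===== SOURCE B (Python) =====
-- def prod_det_nps(det_df_all_nouns_li):
--     # Sort the nouns (second tokens) of the deduplicated items, then count
--     # maximal runs of length >= 2 in a single linear scan -- no grouping dict.
--     nouns = sorted(x.split()[1] for x in set(det_df_all_nouns_li))
--     num = 0
--     run = 0
--     prev = None
--     for noun in nouns:
--         if noun == prev:
--             run += 1
--             if run == 2: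
--                 num += 1
--         else:
--             run = 1
--             prev = noun
--     return {'productive_bool': 1 if num >= 1 else 0,
--             'num_productive_nouns': num}
-- ===== Notes on version B (the rewrite author's own statement) =====
-- stated objective: alternative
-- what changed: B sorts the nouns (second tokens) of the deduplicated input and counts maximal runs of length >= 2 in one linear scan with a prev/run-length state, instead of A's grouping dict of per-noun determiner lists filtered by list length.
import Mathlib
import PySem

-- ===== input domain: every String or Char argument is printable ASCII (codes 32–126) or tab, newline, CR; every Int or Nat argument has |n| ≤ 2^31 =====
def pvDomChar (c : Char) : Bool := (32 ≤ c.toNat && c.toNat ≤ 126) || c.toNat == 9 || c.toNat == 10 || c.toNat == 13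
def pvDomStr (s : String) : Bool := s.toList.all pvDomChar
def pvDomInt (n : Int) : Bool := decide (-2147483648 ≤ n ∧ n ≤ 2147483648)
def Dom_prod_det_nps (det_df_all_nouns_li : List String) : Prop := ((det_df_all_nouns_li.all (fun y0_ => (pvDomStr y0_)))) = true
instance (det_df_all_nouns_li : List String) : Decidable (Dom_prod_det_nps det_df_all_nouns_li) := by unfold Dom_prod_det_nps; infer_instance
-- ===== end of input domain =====

-- B sorts the nouns (second tokens) of the deduplicated input and counts maximal runs of
-- length ≥ 2 in one linear scan, instead of A's dict of per-noun determiner lists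
-- filtered by list length (objective: alternative algorithm, similar cost).

-- ===== PORT A =====
-- x.split()[1] / x.split()[0]; the '.getD ""' makes the port total — under Pre_ the index is in
-- range, so it is exactly Python's value there (outside Pre_ Python raises IndexError).
def pvNoun (x : String) : String := (PySem.List.pyGet? (PySem.Str.split₀ x) 1).getD ""
def pvDet (x : String) : String := (PySem.List.pyGet? (PySem.Str.split₀ x) 0).getD ""

-- one iteration of A's for-loop over set(det_df_all_nouns_li)
def pvStepA (d : PySem.Dict String (PySem.Dict String (List String))) (x : String) :
    PySem.Dict String (PySem.Dict String (List String)) :=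
  if d.contains (pvNoun x) = false then
    ((d.insert (pvNoun x) (PySem.Dict.ofList [("dets_li", ([] : List String))])).modify
      (pvNoun x) PySem.Dict.empty (fun inner => inner.modify "dets_li" [] (fun l => l ++ [pvDet x])))
  else
    (d.modify (pvNoun x) PySem.Dict.empty (fun inner => inner.modify "dets_li" [] (fun l => l ++ [pvDet x])))

def prod_det_nps (det_df_all_nouns_li : List String) : List (String × Int) :=
  let nps_set_di := (PySem.Set.ofList det_df_all_nouns_li).foldl pvStepA PySem.Dict.empty
  let prod_nouns :=
    (nps_set_di.items.filter
      (fun kv => decide (2 ≤ ((nps_set_di.getD kv.1 PySem.Dict.empty).getD "dets_li" []).length))).map (·.1)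
  if 1 ≤ prod_nouns.length then
    [("productive_bool", (1 : Int)), ("num_productive_nouns", (prod_nouns.length : Int))]
  else
    [("productive_bool", (0 : Int)), ("num_productive_nouns", (prod_nouns.length : Int))]

-- ===== PORT B =====
-- state (num, run, prev); Python's 'noun == prev' with prev = None is False
def pvStepB (st : Int × Int × Option String) (noun : String) : Int × Int × Option String :=
  if st.2.2 = some noun then
    (if st.2.1 + 1 = 2 then st.1 + 1 else st.1, st.2.1 + 1, st.2.2)
  else
    (st.1, 1, some noun)

def prod_det_nps_alt (det_df_all_nouns_li : List String) : List (String × Int) :=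
  let nouns := PySem.List.sorted ((PySem.Set.ofList det_df_all_nouns_li).map pvNoun) (fun x => x) false
  let st := nouns.foldl pvStepB (0, 0, none)
  [("productive_bool", if 1 ≤ st.1 then (1 : Int) else 0),
   ("num_productive_nouns", st.1)]

-- ===== PRECONDITION & SPEC =====
-- Pre_ excludes exactly the inputs where some string has fewer than two whitespace-separated
-- tokens: there x.split()[1] raises IndexError in Python A (and in B alike).
def pvWs (c : Char) : Bool := c == ' ' || c == '\t' || c == '\n' || c == '\r' || c == '\x0b' || c == '\x0c'
-- the string has at least two whitespace-separated tokens (= 2 ≤ len(x.split()))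
def pvHasTwo (cs : List Char) : Bool :=
  let rest := (cs.dropWhile pvWs).dropWhile (fun c => !pvWs c)
  !(cs.dropWhile pvWs).isEmpty && !(rest.dropWhile pvWs).isEmpty
def Pre_prod_det_nps (det_df_all_nouns_li : List String) : Prop :=
  ∀ x ∈ det_df_all_nouns_li, pvHasTwo x.toList = true
instance (det_df_all_nouns_li : List String) : Decidable (Pre_prod_det_nps det_df_all_nouns_li) := by
  unfold Pre_prod_det_nps; infer_instance

def pvWitness_prod_det_nps : List String := ["a ox", "that fox", "one cat", "the ox"]

def Spec_prod_det_nps (det_df_all_nouns_li : List String) (out : List (String × Int)) : Prop := out = prod_det_nps_alt det_df_all_nouns_li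
instance (det_df_all_nouns_li : List String) (out : List (String × Int)) : Decidable (Spec_prod_det_nps det_df_all_nouns_li out) := by unfold Spec_prod_det_nps; infer_instance

-- ===== CLAIM (what is proved, stated in full; the proofs are below) =====
def Claim_equal_prod_det_nps : Prop := ∀ (det_df_all_nouns_li : List String), Dom_prod_det_nps det_df_all_nouns_li → Pre_prod_det_nps det_df_all_nouns_li → Spec_prod_det_nps det_df_all_nouns_li (prod_det_nps det_df_all_nouns_li)

-- ===== LEMMAS AND PROOFS =====

-- the number of distinct values of t that occur at least twice in t
def pvD (t : List String) : Nat := t.dedup.countP (fun k => decide (2 ≤ t.count k))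

-- countP agrees on any two nodup lists with the same members
lemma countP_nodup_mem (u v : List String) (p : String → Bool)
    (hu : u.Nodup) (hv : v.Nodup) (h : ∀ x, x ∈ u ↔ x ∈ v) :
    u.countP p = v.countP p :=
  ((List.perm_ext_iff_of_nodup hu hv).2 h).countP_eq p

-- pvD is invariant under permutation
lemma pvD_perm (s t : List String) (h : s.Perm t) : pvD s = pvD t := by
  unfold pvD
  rw [List.countP_congr (fun k _ => by rw [h.count_eq])]
  exact countP_nodup_mem _ _ _ (List.nodup_dedup s) (List.nodup_dedup t)
    (fun x => by simp only [List.mem_dedup]; exact ⟨fun hx => h.mem_iff.1 hx, fun hx => h.mem_iff.2 hx⟩)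

-- peel one element off pvD
lemma pvD_cons (a : String) (t : List String) :
    pvD (a :: t) = (if a ∈ t then 1 else 0) + pvD (t.filter (· ≠ a)) := by
  unfold pvD
  have hfa : a ∉ t.filter (· ≠ a) := by simp
  have h1 : (a :: t).dedup.countP (fun k => decide (2 ≤ (a :: t).count k))
      = (a :: (t.filter (· ≠ a)).dedup).countP (fun k => decide (2 ≤ (a :: t).count k)) := by
    apply countP_nodup_mem _ _ _ (List.nodup_dedup _)
      (List.nodup_cons.2 ⟨by simp, List.nodup_dedup _⟩)
    intro x
    simp only [List.mem_dedup, List.mem_cons, List.mem_filter]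
    by_cases hx : x = a <;> simp [hx]
  rw [h1, List.countP_cons]
  have h2 : (decide (2 ≤ (a :: t).count a) : Bool) = (if a ∈ t then true else false) := by
    rw [List.count_cons_self]
    by_cases h : a ∈ t
    · simp [h, Nat.succ_le_succ (List.count_pos_iff.2 h)]
    · simp [h, List.count_eq_zero_of_not_mem h]
  have h3 : (t.filter (· ≠ a)).dedup.countP (fun k => decide (2 ≤ (a :: t).count k))
      = (t.filter (· ≠ a)).dedup.countP (fun k => decide (2 ≤ (t.filter (· ≠ a)).count k)) := by
    apply List.countP_congr
    intro k hk
    have hka : k ≠ a := by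
      rw [List.mem_dedup, List.mem_filter] at hk
      simpa using hk.2
    simp [List.count_filter, hka, Ne.symm hka]
  rw [h3] at *
  by_cases h : a ∈ t <;> (simp [h] at h2 ⊢; try omega)

-- B's scan over a sorted suffix whose elements are all ≥ the current prev
lemma foldB_invariant (s : List String) (hs : s.Pairwise (· ≤ ·)) :
    ∀ (p : String) (num run : Int), 1 ≤ run → (∀ x ∈ s, p ≤ x) →
    (s.foldl pvStepB (num, run, some p)).1
      = num + (if run = 1 ∧ p ∈ s then 1 else 0) + (pvD (s.filter (· ≠ p)) : Int) := by
  induction s with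
  | nil => intro p num run _ _; simp [pvD]
  | cons a t ih =>
      intro p num run hrun hge
      have hpa : p ≤ a := hge a (List.mem_cons_self)
      have hta : ∀ x ∈ t, a ≤ x := fun x hx => (List.pairwise_cons.1 hs).1 x hx
      have hst : t.Pairwise (· ≤ ·) := (List.pairwise_cons.1 hs).2
      by_cases hap : a = p
      · subst hap
        have hstep : pvStepB (num, run, some a) a
            = (if run + 1 = 2 then num + 1 else num, run + 1, some a) := by
          simp [pvStepB]
        rw [List.foldl_cons, hstep,
            ih hst a _ (run + 1) (by omega) (fun x hx => hta x hx)]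
        have hr1 : ¬ (run + 1 = 1 ∧ a ∈ t) := by rintro ⟨h, _⟩; omega
        have hfil : (a :: t).filter (· ≠ a) = t.filter (· ≠ a) := by simp
        rw [if_neg hr1, hfil]
        by_cases h : run = 1
        · simp [h]
        · have : ¬ (run + 1 = 2) := by omega
          simp [h, this]
      · have hpt : p ∉ a :: t := by
          intro hmem
          rcases List.mem_cons.1 hmem with h | h
          · exact hap h.symm
          · exact hap (le_antisymm (hta p h) hpa)
        have hstep : pvStepB (num, run, some p) a = (num, 1, some a) := by
          simp only [pvStepB]
          rw [if_neg (by simpa using fun h => hap h.symm)]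
        rw [List.foldl_cons, hstep,
            ih hst a num 1 (by omega) hta]
        have hfil : (a :: t).filter (· ≠ p) = a :: t.filter (· ≠ p) := by
          simp [fun h => hap h]
        have hpt' : p ∉ t := fun h => hpt (List.mem_cons_of_mem a h)
        have hfilt : t.filter (· ≠ p) = t := List.filter_eq_self.2 (fun x hx => by
          simp only [ne_eq, decide_eq_true_eq]
          intro hxp; exact hpt' (hxp ▸ hx))
        rw [if_neg (fun hc : run = 1 ∧ p ∈ a :: t => hpt hc.2), hfil, hfilt, pvD_cons]
        by_cases h : a ∈ t
        · rw [if_pos ⟨rfl, h⟩, if_pos h]; push_cast; ring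
        · rw [if_neg (fun hc => h hc.2), if_neg h]; push_cast; ring

-- B's scan computes pvD of the sorted noun list
lemma foldB_eq_pvD (s : List String) (hs : s.Pairwise (· ≤ ·)) :
    (s.foldl pvStepB (0, 0, none)).1 = (pvD s : Int) := by
  cases s with
  | nil => simp [pvD]
  | cons a t =>
      have hstep : pvStepB ((0 : Int), (0 : Int), (none : Option String)) a = (0, 1, some a) := by
        simp [pvStepB]
      rw [List.foldl_cons, hstep,
          foldB_invariant t (List.pairwise_cons.1 hs).2 a 0 1 (by omega)
            (fun x hx => (List.pairwise_cons.1 hs).1 x hx),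
          pvD_cons]
      by_cases h : a ∈ t <;> simp [h]

-- ===== A-side lemmas (bucket lengths = noun multiplicities) =====

-- one step of A's loop records exactly one more key occurrence of pvNoun x
lemma stepA_keys (d : PySem.Dict String (PySem.Dict String (List String))) (x : String) :
    (pvStepA d x).keys = PySem.Set.add d.keys (pvNoun x) := by
  unfold pvStepA
  by_cases hmem : pvNoun x ∈ d.keys
  · have hc : d.contains (pvNoun x) = true := by
      rw [PySem.Dict.contains_eq_decide_mem_keys]; simpa
    rw [if_neg (by simp [hc]), PySem.Dict.keys_modify,
        PySem.Dict.keys_insert_of_contains _ _ hc]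
    simp [PySem.Set.add, PySem.Set.contains, hmem]
  · have hc : d.contains (pvNoun x) = false := by
      rw [PySem.Dict.contains_eq_decide_mem_keys]; simpa
    rw [if_pos hc, PySem.Dict.keys_modify,
        PySem.Dict.keys_insert_of_contains _ _ (by simp [PySem.Dict.contains_insert_self]),
        PySem.Dict.keys_insert_of_not_contains d _ hc]
    simp [PySem.Set.add, PySem.Set.contains, hmem]

-- one step of A's loop appends one determiner to (exactly) the bucket of pvNoun x
lemma stepA_len (d : PySem.Dict String (PySem.Dict String (List String))) (x n : String) :
    (((pvStepA d x).getD n PySem.Dict.empty).getD "dets_li" []).length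
      = ((d.getD n PySem.Dict.empty).getD "dets_li" []).length
        + (if pvNoun x = n then 1 else 0) := by
  unfold pvStepA
  by_cases hk : pvNoun x = n
  · subst hk
    by_cases hc : d.contains (pvNoun x) = false
    · rw [if_pos hc, PySem.Dict.getD_modify_self, PySem.Dict.getD_insert_self,
          PySem.Dict.getD_modify_self, PySem.Dict.getD_of_not_contains d _ hc]
      simp [PySem.Dict.getD_empty]
      decide
    · rw [if_neg hc, PySem.Dict.getD_modify_self, PySem.Dict.getD_modify_self]
      simp
  · have hk' : n ≠ pvNoun x := Ne.symm hk
    split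
    · rw [PySem.Dict.getD_modify_of_ne _ _ _ hk', PySem.Dict.getD_insert_of_ne _ _ _ hk']
      simp
    · rw [PySem.Dict.getD_modify_of_ne _ _ _ hk']
      simp

-- A's fold: bucket length at n = base + how often n occurs among the nouns of l
lemma foldA_len (l : List String) (d : PySem.Dict String (PySem.Dict String (List String))) (n : String) :
    (((l.foldl pvStepA d).getD n PySem.Dict.empty).getD "dets_li" []).length
      = ((d.getD n PySem.Dict.empty).getD "dets_li" []).length + (l.map pvNoun).count n := by
  induction l generalizing d with
  | nil => simp
  | cons x t ih =>
      simp only [List.foldl_cons, List.map_cons]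
      rw [ih, stepA_len]
      rcases eq_or_ne (pvNoun x) n with h | h
      · simp [h]; omega
      · simp [h]

-- A's fold has the nouns of l as keys (first-occurrence order past d.keys)
lemma foldA_keys (l : List String) (d : PySem.Dict String (PySem.Dict String (List String))) :
    (l.foldl pvStepA d).keys = PySem.Set.update d.keys (l.map pvNoun) := by
  induction l generalizing d with
  | nil => simp [PySem.Set.update]
  | cons x t ih =>
      simp only [List.foldl_cons, List.map_cons]
      rw [ih, stepA_keys]
      simp [PySem.Set.update]

-- the two ports agree on every input (the equivalence needs no precondition)
theorem prod_det_nps_eq_alt (li : List String) :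
    prod_det_nps li = prod_det_nps_alt li := by
  unfold prod_det_nps prod_det_nps_alt
  set m : List String := (PySem.Set.ofList li).map pvNoun with hm
  -- A's productive-noun count is pvD m
  have hkeys : ((PySem.Set.ofList li).foldl pvStepA PySem.Dict.empty).keys
      = PySem.Set.ofList m := by
    rw [foldA_keys]; rfl
  have hnodup : ((PySem.Set.ofList li).foldl pvStepA PySem.Dict.empty).keys.Nodup := by
    rw [hkeys]; exact PySem.Set.nodup_ofList m
  have hlen : ∀ n, ((((PySem.Set.ofList li).foldl pvStepA PySem.Dict.empty).getD n
      PySem.Dict.empty).getD "dets_li" []).length = m.count n := by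
    intro n
    rw [foldA_len]
    simp [hm]
  have hA : ((((PySem.Set.ofList li).foldl pvStepA PySem.Dict.empty).items.filter
      (fun kv => decide (2 ≤ ((((PySem.Set.ofList li).foldl pvStepA PySem.Dict.empty).getD kv.1
        PySem.Dict.empty).getD "dets_li" []).length))).map (·.1)).length
      = pvD m := by
    rw [List.length_map, ← List.countP_eq_length_filter,
        PySem.Dict.items_eq_map_keys _ hnodup PySem.Dict.empty, List.countP_map, hkeys]
    unfold pvD
    rw [← countP_nodup_mem (PySem.Set.ofList m) m.dedup _
          (PySem.Set.nodup_ofList m) (List.nodup_dedup m)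
          (fun x => by rw [List.mem_dedup, PySem.Set.mem_ofList])]
    apply List.countP_congr
    intro k _
    simp [hlen k]
  -- B's scan result is pvD m too
  have hsort : (PySem.List.sorted m (fun x => x) false).Pairwise (· ≤ ·) := by
    have := PySem.List.sorted_pairwise (xs := m) (key := fun x => x)
    simpa using this
  have hB : ((PySem.List.sorted m (fun x => x) false).foldl pvStepB (0, 0, none)).1
      = (pvD m : Int) := by
    rw [foldB_eq_pvD _ hsort,
        pvD_perm _ _ (PySem.List.sorted_perm m (fun x => x) false)]
  dsimp only
  rw [hB, hA]
  by_cases h : 1 ≤ pvD m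
  · rw [if_pos h, if_pos (by exact_mod_cast h)]
  · rw [if_neg h, if_neg (by exact_mod_cast h)]

-- ===== VERDICT (by name: the statement is the Claim_ definition above) =====
theorem prod_det_nps_spec : Claim_equal_prod_det_nps := by
  intro li _ _
  unfold Spec_prod_det_nps
  exact prod_det_nps_eq_alt li
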